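-- pv_equiv track=rewrite | github.com/AVAKSon/Complexity-Analysis | Python/Numbers with prime digits whose sum is 13.py | prime_digits_sum
-- ===== SOURCE A (Python) =====
-- from collections import deque
--
-- def prime_digits_sum(r):
--     q = deque([(r, 0)])
--     while q:
--         r, n = q.popleft()
--         for d in 2, 3, 5, 7:
--             if d >= r:
--                 if d == r: yield n + d
--                 break
--             q.append((r - d, (n + d) * 10))
-- ===== SOURCE B (Python) =====
-- def prime_digits_sum(r):
--     # length-bucketed enumeration: k-digit prime-digit numbers in numeric order
--     for k in range(1, r // 2 + 1):
--         yield from _fixed_length(k, r, 0)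
--
-- def _fixed_length(k, s, acc):
--     # all numbers acc*10^k + (k prime digits summing to s), in numeric order
--     if s < 2 * k or s > 7 * k:
--         return []
--     if k == 0:
--         return [acc]
--     out = []
--     for d in (2, 3, 5, 7):
--         out += _fixed_length(k - 1, s - d, acc * 10 + d)
--     return out
-- ===== Notes on version B (the rewrite author's own statement) =====
-- stated objective: alternative
-- what changed: Replaced the FIFO-queue breadth-first search over (remainder, prefix) states by a length-bucketed recursive enumeration: for each possible digit count k in ascending order, recursively enumerate the k-tuples of prime digits summing to r (with a feasibility prune on the remaining sum), which reproduces A's (length, numeric) emission order.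
import Mathlib
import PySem

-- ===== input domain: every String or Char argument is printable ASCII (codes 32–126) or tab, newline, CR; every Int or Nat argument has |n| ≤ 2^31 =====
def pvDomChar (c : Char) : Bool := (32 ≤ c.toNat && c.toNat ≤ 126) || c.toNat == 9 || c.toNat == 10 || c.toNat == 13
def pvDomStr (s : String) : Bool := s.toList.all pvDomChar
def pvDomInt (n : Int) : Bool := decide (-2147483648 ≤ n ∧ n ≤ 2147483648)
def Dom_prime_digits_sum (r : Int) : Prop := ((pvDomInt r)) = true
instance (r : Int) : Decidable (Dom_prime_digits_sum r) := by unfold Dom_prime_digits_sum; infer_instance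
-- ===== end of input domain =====

-- B replaces A's FIFO breadth-first search by a length-bucketed recursive enumeration
-- (same values, same order); alternative structure, no speed claim.

-- ===== PORT A =====
-- inner loop 'for d in 2,3,5,7: if d >= r: (yield if d == r); break; else append':
-- returns (appended queue entries, yielded values) in order.
def pvInner : List Int → Int → Int → List (Int × Int) × List Int
  | [], _, _ => ([], [])
  | d :: ds, r, n =>
    if r ≤ d then ([], if d = r then [n + d] else [])
    else
      let res := pvInner ds r n
      ((r - d, (n + d) * 10) :: res.1, res.2)

-- termination measure for the BFS queue: Σ 3^(remainder.toNat)
def pvQM (q : List (Int × Int)) : Nat := (q.map (fun p => 3 ^ p.1.toNat)).sum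

theorem pvInner_measure (ds : List Int) (r n : Int) (h : ∀ d ∈ ds, 2 ≤ d) :
    9 * pvQM (pvInner ds r n).1 ≤ ds.length * 3 ^ r.toNat := by
  induction ds with
  | nil => simp [pvInner, pvQM]
  | cons d ds ih =>
    have hd : 2 ≤ d := h d (by simp)
    have ih' := ih (fun x hx => h x (by simp [hx]))
    by_cases hrd : r ≤ d
    · simp [pvInner, hrd, pvQM]
    · have hlt : d < r := lt_of_not_ge hrd
      have hkey : (r - d).toNat + 2 ≤ r.toNat := by omega
      have h9 : 9 * 3 ^ (r - d).toNat ≤ 3 ^ r.toNat := by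
        calc 9 * 3 ^ (r - d).toNat = 3 ^ ((r - d).toNat + 2) := by ring
        _ ≤ 3 ^ r.toNat := Nat.pow_le_pow_right (by norm_num) hkey
      simp only [pvInner, hrd, if_false, pvQM, List.map_cons, List.sum_cons, List.length_cons]
      have : 9 * (3 ^ (r - d).toNat + pvQM (pvInner ds r n).1)
          = 9 * 3 ^ (r - d).toNat + 9 * pvQM (pvInner ds r n).1 := by ring
      rw [pvQM] at ih'
      have hexp : (ds.length + 1) * 3 ^ r.toNat = ds.length * 3 ^ r.toNat + 3 ^ r.toNat := by ring
      omega

theorem pvGo_dec (r n : Int) (rest : List (Int × Int)) :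
    pvQM (rest ++ (pvInner [2, 3, 5, 7] r n).1) < pvQM ((r, n) :: rest) := by
  have h := pvInner_measure [2, 3, 5, 7] r n (by intro d hd; fin_cases hd <;> norm_num)
  have hpos : 0 < 3 ^ r.toNat := Nat.pow_pos (by norm_num)
  have happ : ∀ (a b : List (Int × Int)), pvQM (a ++ b) = pvQM a + pvQM b := by
    intro a b; simp [pvQM]
  have hcons : pvQM ((r, n) :: rest) = 3 ^ r.toNat + pvQM rest := by simp [pvQM]
  rw [happ, hcons]
  simp only [List.length_cons, List.length_nil] at h
  omega

-- while q: pop; yield; append children (FIFO)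
def pvGoA : List (Int × Int) → List Int
  | [] => []
  | (r, n) :: rest =>
    (pvInner [2, 3, 5, 7] r n).2 ++ pvGoA (rest ++ (pvInner [2, 3, 5, 7] r n).1)
termination_by q => pvQM q
decreasing_by exact pvGo_dec r n rest

def prime_digits_sum (r : Int) : List Int := pvGoA [(r, 0)]

-- ===== PORT B =====
-- _fixed_length(k, s, acc): recursion on k (a Nat in the port; B only calls it with k ≥ 0)
def pvEmit : Nat → Int → Int → List Int
  | k, s, acc =>
    if s < 2 * (k : Int) ∨ 7 * (k : Int) < s then []
    else match k with
      | 0 => [acc]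
      | k + 1 => [2, 3, 5, 7].flatMap (fun d => pvEmit k (s - d) (acc * 10 + d))

def prime_digits_sum_alt (r : Int) : List Int :=
  (PySem.List.pyRange 1 (PySem.Int.floordiv r 2 + 1) 1).flatMap (fun k => pvEmit k.toNat r 0)

-- ===== PRECONDITION & SPEC =====
def Spec_prime_digits_sum (r : Int) (out : List Int) : Prop := out = prime_digits_sum_alt r
instance (r : Int) (out : List Int) : Decidable (Spec_prime_digits_sum r out) := by unfold Spec_prime_digits_sum; infer_instance

-- ===== CLAIM (what is proved, stated in full; the proofs are below) =====
def Claim_equal_prime_digits_sum : Prop := ∀ (r : Int), Dom_prime_digits_sum r → Spec_prime_digits_sum r (prime_digits_sum r)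

-- ===== LEMMAS AND PROOFS =====

-- unguarded version of pvEmit used by the proofs
def pvE : Nat → Int → Int → List Int
  | 0, s, acc => if s = 0 then [acc] else []
  | k + 1, s, acc => [2, 3, 5, 7].flatMap (fun d => pvE k (s - d) (acc * 10 + d))

theorem pvE_out (k : Nat) (s acc : Int) (h : s < 2 * (k : Int) ∨ 7 * (k : Int) < s) :
    pvE k s acc = [] := by
  induction k generalizing s acc with
  | zero => simp only [Nat.cast_zero] at h; simp [pvE]; omega
  | succ k ih =>
    simp only [pvE, List.flatMap_cons, List.flatMap_nil, List.append_nil]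
    rw [ih (s - 2) _ (by push_cast at h ⊢; omega), ih (s - 3) _ (by push_cast at h ⊢; omega),
        ih (s - 5) _ (by push_cast at h ⊢; omega), ih (s - 7) _ (by push_cast at h ⊢; omega)]
    simp

theorem pvEmit_eq_pvE (k : Nat) (s acc : Int) : pvEmit k s acc = pvE k s acc := by
  induction k generalizing s acc with
  | zero =>
    simp only [pvEmit, pvE]
    split_ifs with h1 h2 <;> try rfl
    · simp at h1; omega
    · simp at h1; omega
  | succ k ih =>
    rw [pvEmit]
    split_ifs with h1
    · exact (pvE_out _ _ _ h1).symm
    · simp only [pvE, ih]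

-- per-node data: children as (remainder, unscaled-acc) pairs
def pvChild (p : Int × Int) : List (Int × Int) :=
  (([2, 3, 5, 7] : List Int).takeWhile (fun d => decide (d < p.1))).map
    (fun d => (p.1 - d, p.2 * 10 + d))

def pvLift (p : Int × Int) : Int × Int := (p.1, 10 * p.2)

def pvStep (ns : List (Int × Int)) : List (Int × Int) := ns.flatMap pvChild

def pvEL (k : Nat) (ns : List (Int × Int)) : List Int :=
  ns.flatMap (fun p => pvE k p.1 p.2)

theorem pvYield_node (s a : Int) :
    (pvInner [2, 3, 5, 7] s (10 * a)).2 = pvE 1 s a := by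
  simp only [pvInner, pvE, List.flatMap_cons, List.flatMap_nil, List.append_nil]
  split_ifs <;> simp_all <;> omega

theorem pvChildren_node (s a : Int) :
    (pvInner [2, 3, 5, 7] s (10 * a)).1 = (pvChild (s, a)).map pvLift := by
  simp only [pvInner, pvChild, List.takeWhile_cons, List.takeWhile_nil]
  split_ifs <;> simp_all <;> try omega
  all_goals simp only [pvLift, Prod.mk.injEq]
  all_goals (repeat' constructor) <;> omega

theorem pvE_shift (k : Nat) (s a : Int) :
    pvE (k + 2) s a = (pvChild (s, a)).flatMap (fun p => pvE (k + 1) p.1 p.2) := by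
  simp only [pvE, pvChild, List.takeWhile_cons, List.takeWhile_nil]
  by_cases h2 : (2 : Int) < s <;> by_cases h3 : (3 : Int) < s <;>
    by_cases h5 : (5 : Int) < s <;> by_cases h7 : (7 : Int) < s <;>
    (try simp [h2, h3, h5, h7]) <;> (try omega)
  all_goals (repeat' apply And.intro) <;> (apply pvE_out; left; omega)

theorem pvEL_shift (k : Nat) (ns : List (Int × Int)) :
    pvEL (k + 2) ns = pvEL (k + 1) (pvStep ns) := by
  simp only [pvEL, pvStep, List.flatMap_assoc]
  apply List.flatMap_congr
  intro p _
  rw [pvE_shift k p.1 p.2]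

-- FIFO expansion: processing q1 first, then q2 and q1's children
theorem pvGoA_fifo (q1 : List (Int × Int)) : ∀ q2,
    pvGoA (q1 ++ q2) =
      q1.flatMap (fun p => (pvInner [2, 3, 5, 7] p.1 p.2).2)
        ++ pvGoA (q2 ++ q1.flatMap (fun p => (pvInner [2, 3, 5, 7] p.1 p.2).1)) := by
  induction q1 with
  | nil => intro q2; simp
  | cons p rest ih =>
    intro q2
    obtain ⟨s, n⟩ := p
    rw [List.cons_append, pvGoA]
    rw [List.append_assoc rest q2]
    rw [ih (q2 ++ (pvInner [2, 3, 5, 7] s n).1)]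
    simp [List.append_assoc]

theorem pvGoA_level (ns : List (Int × Int)) :
    pvGoA (ns.map pvLift) = pvEL 1 ns ++ pvGoA ((pvStep ns).map pvLift) := by
  have h := pvGoA_fifo (ns.map pvLift) []
  rw [List.append_nil] at h
  rw [h]
  congr 1
  · simp only [List.flatMap_map, pvEL]
    apply List.flatMap_congr
    intro p _
    exact pvYield_node p.1 p.2
  · congr 1
    simp only [List.nil_append, List.flatMap_map, pvStep, List.map_flatMap]
    apply List.flatMap_congr
    intro p _
    exact pvChildren_node p.1 p.2

theorem pvStep_bound (ns : List (Int × Int)) (m : Nat)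
    (h : ∀ p ∈ ns, p.1 ≤ 2 * (m : Int) + 3) :
    ∀ p ∈ pvStep ns, p.1 ≤ 2 * (m : Int) + 1 := by
  intro p hp
  simp only [pvStep, List.mem_flatMap] at hp
  obtain ⟨q, hq, hpq⟩ := hp
  simp only [pvChild, List.mem_map] at hpq
  obtain ⟨d, hd, rfl⟩ := hpq
  have hd2 : 2 ≤ d := by
    have := List.takeWhile_subset _ hd
    fin_cases this <;> norm_num
  have := h q hq
  simp only
  omega

theorem pvGoA_main (m : Nat) : ∀ (ns : List (Int × Int)),
    (∀ p ∈ ns, p.1 ≤ 2 * (m : Int) + 1) →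
    pvGoA (ns.map pvLift) = (List.range m).flatMap (fun j => pvEL (j + 1) ns) := by
  induction m with
  | zero =>
    intro ns h
    rw [pvGoA_level]
    have h1 : pvEL 1 ns = [] := by
      simp only [pvEL]
      apply List.flatMap_eq_nil_iff.mpr
      intro p hp
      exact pvE_out 1 p.1 p.2 (by left; have := h p hp; push_cast at this ⊢; omega)
    have h2 : pvStep ns = [] := by
      apply List.flatMap_eq_nil_iff.mpr
      intro p hp
      have hp1 := h p hp
      simp only [pvChild, List.takeWhile]
      have : ¬ ((2 : Int) < p.1) := by push_cast at hp1; omega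
      simp [this]
    rw [h1, h2]
    simp [pvGoA]
  | succ m ih =>
    intro ns h
    rw [pvGoA_level]
    have hb : ∀ p ∈ pvStep ns, p.1 ≤ 2 * (m : Int) + 1 := by
      apply pvStep_bound
      intro p hp; have := h p hp; push_cast at this ⊢; omega
    rw [ih (pvStep ns) hb]
    rw [List.range_succ_eq_map]
    simp only [List.flatMap_cons, List.flatMap_map]
    congr 1
    apply List.flatMap_congr
    intro j _
    exact (pvEL_shift j ns).symm

theorem pvE_singleton (k : Nat) (r : Int) :
    pvEL k [(r, 0)] = pvE k r 0 := by
  simp [pvEL]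

theorem prime_digits_sum_eq_range (r : Int) :
    prime_digits_sum r = (List.range r.toNat).flatMap (fun j => pvE (j + 1) r 0) := by
  have hlift : [((r : Int), (0 : Int))] = ([((r : Int), (0 : Int))]).map pvLift := by
    simp [pvLift]
  have hb : ∀ p ∈ [((r : Int), (0 : Int))], p.1 ≤ 2 * ((r.toNat : Nat) : Int) + 1 := by
    intro p hp
    simp at hp
    subst hp
    simp only
    omega
  rw [prime_digits_sum, hlift, pvGoA_main r.toNat _ hb]
  apply List.flatMap_congr
  intro j _
  exact pvE_singleton (j + 1) r

theorem pvAlt_eq_range (r : Int) :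
    prime_digits_sum_alt r
      = (List.range (PySem.Int.floordiv r 2 + 1 - 1).toNat).flatMap (fun j => pvE (j + 1) r 0) := by
  rw [prime_digits_sum_alt, PySem.List.pyRange_one]
  rw [List.flatMap_map]
  apply List.flatMap_congr
  intro j hj
  have : ((1 : Int) + (j : Int)).toNat = j + 1 := by omega
  rw [this, pvEmit_eq_pvE]

theorem prime_digits_sum_agree (r : Int) :
    prime_digits_sum r = prime_digits_sum_alt r := by
  rw [prime_digits_sum_eq_range, pvAlt_eq_range]
  set K := (PySem.Int.floordiv r 2 + 1 - 1).toNat with hK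
  have hfd : 2 * PySem.Int.floordiv r 2 ≤ r ∧ r - 1 ≤ 2 * PySem.Int.floordiv r 2 := by
    have h := PySem.Int.floordiv_mul_add_mod r 2
    have h2 : 0 ≤ PySem.Int.mod r 2 ∧ PySem.Int.mod r 2 < 2 := by
      constructor
      · exact PySem.Int.mod_nonneg r (by norm_num)
      · exact PySem.Int.mod_lt r (by norm_num)
    omega
  have hKle : K ≤ r.toNat := by omega
  have hKbig : ∀ j : Nat, K ≤ j → pvE (j + 1) r 0 = [] := by
    intro j hj
    apply pvE_out
    left
    push_cast
    omega
  obtain ⟨t, ht⟩ : ∃ t, r.toNat = K + t := ⟨r.toNat - K, by omega⟩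
  rw [ht, List.range_add, List.flatMap_append]
  have : (List.map (fun x => K + x) (List.range t)).flatMap (fun j => pvE (j + 1) r 0) = [] := by
    apply List.flatMap_eq_nil_iff.mpr
    intro j hj
    simp only [List.mem_map] at hj
    obtain ⟨x, _, rfl⟩ := hj
    exact hKbig _ (by omega)
  rw [this, List.append_nil]

-- ===== VERDICT (by name: the statement is the Claim_ definition above) =====
theorem prime_digits_sum_spec : Claim_equal_prime_digits_sum := by
  intro r _
  unfold Spec_prime_digits_sum
  exact prime_digits_sum_agree r
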